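-- pv_equiv track=rewrite | github.com/DeepakBairagi2025/JARVIS-1.1 | AUTOMATION/JARVIS_AUTOMATION_YOUTUBE/YOUTUBE_VIDEO_HOME/youtube_test.py | parse_video_index
-- ===== SOURCE A (Python) =====
-- def parse_video_index(command: str) -> int:
--     """Return 1-based index parsed from phrases like 'video 2', 'second video', 'open third', etc. 0 if none."""
--     words = command.lower().replace("-", " ").split()
--     # Map common ordinal/cardinal words
--     word_to_num = {
--         "one": 1, "first": 1, "1st": 1,
--         "two": 2, "second": 2, "2nd": 2,
--         "three": 3, "third": 3, "3rd": 3,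
--         "four": 4, "fourth": 4, "4th": 4,
--         "five": 5, "fifth": 5, "5th": 5,
--         "six": 6, "sixth": 6, "6th": 6,
--         "seven": 7, "seventh": 7, "7th": 7,
--         "eight": 8, "eighth": 8, "8th": 8,
--         "nine": 9, "ninth": 9, "9th": 9,
--         "ten": 10, "tenth": 10, "10th": 10,
--     }
--     # 1) look for explicit pattern: 'video <n>'
--     for i, w in enumerate(words[:-1]):
--         if w == "video":
--             nxt = words[i+1]
--             if nxt.isdigit():
--                 return int(nxt)
--             if nxt in word_to_num:
--                 return word_to_num[nxt]
--     # 2) look for standalone ordinals/cardinals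
--     for w in words:
--         if w.isdigit():
--             return int(w)
--         if w in word_to_num:
--             return word_to_num[w]
--     return 0
-- ===== SOURCE B (Python) =====
-- def parse_video_index(command: str) -> int:
--     """Single pass: return the number after the first qualifying "video" word; else the first standalone number word; else 0."""
--     word_to_num = {
--         "one": 1, "first": 1, "1st": 1,
--         "two": 2, "second": 2, "2nd": 2,
--         "three": 3, "third": 3, "3rd": 3,
--         "four": 4, "fourth": 4, "4th": 4,
--         "five": 5, "fifth": 5, "5th": 5,
--         "six": 6, "sixth": 6, "6th": 6,
--         "seven": 7, "seventh": 7, "7th": 7,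
--         "eight": 8, "eighth": 8, "8th": 8,
--         "nine": 9, "ninth": 9, "9th": 9,
--         "ten": 10, "tenth": 10, "10th": 10,
--     }
--
--     def num(w):
--         if w.isdigit():
--             return int(w)
--         return word_to_num.get(w)
--
--     words = command.lower().replace("-", " ").split()
--     pending = None
--     for i, w in enumerate(words):
--         if w == "video" and i + 1 < len(words):
--             n = num(words[i + 1])
--             if n is not None:
--                 return n
--         if pending is None:
--             pending = num(w)
--     return pending if pending is not None else 0
-- ===== Notes on version B (the rewrite author's own statement) =====
-- stated objective: alternative
-- what changed: A makes two separate scans (first for video-then-number pairs, then for any standalone number word); B is a single left-to-right pass that returns a video-followed-by-number match immediately and keeps one pending first-standalone candidate, returned after the loop.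
import Mathlib
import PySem

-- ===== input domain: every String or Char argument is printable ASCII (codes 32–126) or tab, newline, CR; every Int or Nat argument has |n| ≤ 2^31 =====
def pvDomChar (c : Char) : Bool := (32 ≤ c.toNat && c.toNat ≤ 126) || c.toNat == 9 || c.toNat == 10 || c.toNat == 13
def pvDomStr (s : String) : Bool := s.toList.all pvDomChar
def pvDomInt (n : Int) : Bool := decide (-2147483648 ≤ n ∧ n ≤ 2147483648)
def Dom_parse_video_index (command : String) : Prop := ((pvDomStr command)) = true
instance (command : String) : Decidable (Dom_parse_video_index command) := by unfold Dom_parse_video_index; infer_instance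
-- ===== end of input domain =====

-- B replaces A's two sequential scans with one pass keeping a pending first-standalone candidate
-- (objective: alternative decomposition, same cost). Return-value equivalence only; neither mutates.

-- ===== PORT A =====

-- A's word_to_num dict (insertion order; all keys distinct)
def pvWordToNum : PySem.Dict String Int := PySem.Dict.mk
  [("one", 1), ("first", 1), ("1st", 1),
   ("two", 2), ("second", 2), ("2nd", 2),
   ("three", 3), ("third", 3), ("3rd", 3),
   ("four", 4), ("fourth", 4), ("4th", 4),
   ("five", 5), ("fifth", 5), ("5th", 5),
   ("six", 6), ("sixth", 6), ("6th", 6),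
   ("seven", 7), ("seventh", 7), ("7th", 7),
   ("eight", 8), ("eighth", 8), ("8th", 8),
   ("nine", 9), ("ninth", 9), ("9th", 9),
   ("ten", 10), ("tenth", 10), ("10th", 10)]

-- words = command.lower().replace("-", " ").split()
def pvWords (command : String) : List String :=
  PySem.Str.split₀ (PySem.Str.replace (PySem.Str.lower command) "-" " ")

-- loop 1: for i, w in enumerate(words[:-1]): if w == "video": nxt = words[i+1]; …
-- (recursion over adjacent pairs = the same i / i+1 walk; int(nxt) always succeeds when nxt.isdigit())
def pvALoop1 : List String → Option Int
  | w :: nxt :: rest =>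
    if w == "video" then
      if PySem.Str.strIsdigit nxt then some ((PySem.Int.ofStr? nxt).getD 0)
      else match pvWordToNum.get? nxt with
        | some n => some n
        | none => pvALoop1 (nxt :: rest)
    else pvALoop1 (nxt :: rest)
  | _ => none

-- loop 2: for w in words: if w.isdigit(): return int(w); if w in word_to_num: return word_to_num[w]
def pvALoop2 : List String → Int
  | [] => 0
  | w :: rest =>
    if PySem.Str.strIsdigit w then (PySem.Int.ofStr? w).getD 0
    else match pvWordToNum.get? w with
      | some n => n
      | none => pvALoop2 rest

def parse_video_index (command : String) : Int :=
  match pvALoop1 (pvWords command) with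
  | some n => n
  | none => pvALoop2 (pvWords command)

-- ===== PORT B =====

-- B's helper num(w): int(w) if w.isdigit() else word_to_num.get(w)
def pvNum? (w : String) : Option Int :=
  if PySem.Str.strIsdigit w then some ((PySem.Int.ofStr? w).getD 0)
  else pvWordToNum.get? w

-- B's single loop: state = pending (first standalone number word seen so far)
def pvBScan : List String → Option Int → Int
  | [], pending => pending.getD 0
  | w :: rest, pending =>
    match (if w == "video" then (match rest with | nxt :: _ => pvNum? nxt | [] => none) else none) with
    | some n => n
    | none => pvBScan rest (if pending.isNone then pvNum? w else pending)

def parse_video_index_alt (command : String) : Int :=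
  pvBScan (pvWords command) none

-- ===== PRECONDITION & SPEC =====
def Spec_parse_video_index (command : String) (out : Int) : Prop := out = parse_video_index_alt command
instance (command : String) (out : Int) : Decidable (Spec_parse_video_index command out) := by unfold Spec_parse_video_index; infer_instance

-- ===== CLAIM (what is proved, stated in full; the proofs are below) =====
def Claim_equal_parse_video_index : Prop := ∀ (command : String), Dom_parse_video_index command → Spec_parse_video_index command (parse_video_index command)

-- ===== LEMMAS AND PROOFS =====

-- one definitional step of B's loop
lemma pvBScan_cons_eq (w : String) (rest : List String) (pending : Option Int) :
    pvBScan (w :: rest) pending =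
      match (if w == "video" then (match rest with | nxt :: _ => pvNum? nxt | [] => none) else none) with
      | some n => n
      | none => pvBScan rest (if pending.isNone then pvNum? w else pending) := rfl

-- one step of A's second loop, phrased through B's pvNum?
lemma pvALoop2_cons (w : String) (rest : List String) :
    pvALoop2 (w :: rest) = match pvNum? w with
      | some n => n
      | none => pvALoop2 rest := by
  show (if PySem.Str.strIsdigit w then ((PySem.Int.ofStr? w).getD 0)
        else match pvWordToNum.get? w with
          | some n => n
          | none => pvALoop2 rest) = _
  unfold pvNum?
  split_ifs with h
  · rfl
  · cases pvWordToNum.get? w <;> rfl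

-- A's 'video <nxt>' test, phrased through B's pvNum?
lemma pvALoop1_video (nxt : String) (rest : List String) :
    (if PySem.Str.strIsdigit nxt then some ((PySem.Int.ofStr? nxt).getD 0)
     else match pvWordToNum.get? nxt with
       | some n => some n
       | none => pvALoop1 (nxt :: rest)) =
    (match pvNum? nxt with
     | some n => some n
     | none => pvALoop1 (nxt :: rest)) := by
  unfold pvNum?
  split_ifs with h
  · rfl
  · cases pvWordToNum.get? nxt <;> rfl

-- invariant of B's single pass: it equals A's first scan, with A's second scan as fallback
lemma pvBScan_eq (ws : List String) (pending : Option Int) :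
    pvBScan ws pending = match pvALoop1 ws with
      | some n => n
      | none => match pending with
        | some p => p
        | none => pvALoop2 ws := by
  induction ws generalizing pending with
  | nil => cases pending <;> rfl
  | cons w rest ih =>
    cases rest with
    | nil =>
      have h1 : pvALoop1 [w] = none := rfl
      rw [pvBScan_cons_eq, h1]
      by_cases hv : (w == "video") = true
      · rw [if_pos hv]
        show pvBScan [] (if pending.isNone then pvNum? w else pending) = _
        cases pending with
        | some p => rfl
        | none =>
          show (pvNum? w).getD 0 = pvALoop2 [w]
          rw [pvALoop2_cons]
          cases pvNum? w <;> rfl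
      · rw [if_neg hv]
        show pvBScan [] (if pending.isNone then pvNum? w else pending) = _
        cases pending with
        | some p => rfl
        | none =>
          show (pvNum? w).getD 0 = pvALoop2 [w]
          rw [pvALoop2_cons]
          cases pvNum? w <;> rfl
    | cons nxt rest' =>
      rw [pvBScan_cons_eq]
      have h1 : pvALoop1 (w :: nxt :: rest') =
          if w == "video" then
            (if PySem.Str.strIsdigit nxt then some ((PySem.Int.ofStr? nxt).getD 0)
             else match pvWordToNum.get? nxt with
               | some n => some n
               | none => pvALoop1 (nxt :: rest'))
          else pvALoop1 (nxt :: rest') := rfl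
      rw [h1, pvALoop1_video]
      by_cases hv : (w == "video") = true
      · rw [if_pos hv, if_pos hv]
        change (match pvNum? nxt with
          | some n => n
          | none => pvBScan (nxt :: rest') (if pending.isNone then pvNum? w else pending)) = _
        cases hn : pvNum? nxt with
        | some n => rfl
        | none =>
          rw [ih]
          cases pending with
          | some p => rfl
          | none =>
            conv_rhs => rw [pvALoop2_cons]
            rfl
      · rw [if_neg hv, if_neg hv]
        change pvBScan (nxt :: rest') (if pending.isNone then pvNum? w else pending) = _
        rw [ih]
        cases pending with
        | some p => rfl
        | none =>
          conv_rhs => rw [pvALoop2_cons]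
          rfl

-- ===== VERDICT (by name: the statement is the Claim_ definition above) =====
theorem parse_video_index_spec : Claim_equal_parse_video_index := by
  intro command _
  unfold Spec_parse_video_index parse_video_index parse_video_index_alt
  rw [pvBScan_eq]
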